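-- pv_equiv track=rewrite | github.com/Abraham-O-Ehonwa/PATHWAYS-Research-Data-Analysis-Tool | data_loader.py | standardize_subject
-- ===== SOURCE A (Python) =====
-- def standardize_subject(subject, all_subjects):
--
--
--     subject = subject.strip()
--
--
--     if subject in all_subjects:
--         return subject
--
--
--     for std_subject in all_subjects:
--         if subject.lower() == std_subject.lower():
--             return std_subject
--
--
--     for std_subject in all_subjects:
--         if subject.lower() in std_subject.lower() or std_subject.lower() in subject.lower():
--
--             return std_subject
--
--
--     return "Other"
-- ===== SOURCE B (Python) =====
-- def standardize_subject(subject, all_subjects):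
--     subject = subject.strip()
--     subject_lower = subject.lower()
--     exact = ci = sub = None
--     for std_subject in all_subjects:
--         std_lower = std_subject.lower()
--         if exact is None and std_subject == subject:
--             exact = std_subject
--         if ci is None and std_lower == subject_lower:
--             ci = std_subject
--         if sub is None and (subject_lower in std_lower or std_lower in subject_lower):
--             sub = std_subject
--     if exact is not None:
--         return exact
--     if ci is not None:
--         return ci
--     if sub is not None:
--         return sub
--     return "Other"
-- ===== Notes on version B (the rewrite author's own statement) =====
-- stated objective: faster
-- what changed: Replaces A's three sequential scans (membership test, case-insensitive scan, substring scan) with a single pass that fills three first-match candidate slots and picks them in priority order afterwards.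
import Mathlib
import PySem

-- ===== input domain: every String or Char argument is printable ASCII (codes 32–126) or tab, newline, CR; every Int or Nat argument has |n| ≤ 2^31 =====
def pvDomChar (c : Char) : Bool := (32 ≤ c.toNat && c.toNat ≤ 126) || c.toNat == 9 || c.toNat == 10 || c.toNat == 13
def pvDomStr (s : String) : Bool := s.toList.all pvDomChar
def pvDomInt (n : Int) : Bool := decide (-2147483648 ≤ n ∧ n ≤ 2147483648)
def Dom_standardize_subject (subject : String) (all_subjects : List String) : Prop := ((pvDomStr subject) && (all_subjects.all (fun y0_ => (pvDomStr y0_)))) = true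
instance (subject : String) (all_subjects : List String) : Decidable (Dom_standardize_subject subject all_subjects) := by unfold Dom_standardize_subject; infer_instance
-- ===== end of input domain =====

-- B replaces A's three sequential scans with a single pass that fills three first-match
-- candidate slots (exact / case-insensitive / substring) and picks them in priority order.


-- ===== PORT A =====
-- Port of A: strip, then three sequential scans (exact membership, case-insensitive, substring),
-- each 'for … return' ported as List.find?.
def standardize_subject (subject : String) (all_subjects : List String) : String :=
  let subject := PySem.Str.strip subject
  if all_subjects.contains subject then subject
  else
    match all_subjects.find? (fun s => PySem.Str.lower subject == PySem.Str.lower s) with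
    | some s => s
    | none =>
      match all_subjects.find? (fun s =>
          PySem.Str.isIn (PySem.Str.lower subject) (PySem.Str.lower s)
          || PySem.Str.isIn (PySem.Str.lower s) (PySem.Str.lower subject)) with
      | some s => s
      | none => "Other"

-- ===== PORT B =====
-- Port of B: one fold over all_subjects maintaining three first-match candidate slots,
-- then the priority choice exact > case-insensitive > substring, else "Other".
def standardize_subject_alt (subject : String) (all_subjects : List String) : String :=
  let subj := PySem.Str.strip subject
  let subjL := PySem.Str.lower subj
  let r := all_subjects.foldl
    (fun (acc : Option String × Option String × Option String) s =>
      let stdL := PySem.Str.lower s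
      let e := if acc.1.isNone && s == subj then some s else acc.1
      let c := if acc.2.1.isNone && stdL == subjL then some s else acc.2.1
      let u := if acc.2.2.isNone && (PySem.Str.isIn subjL stdL || PySem.Str.isIn stdL subjL)
               then some s else acc.2.2
      (e, c, u))
    (none, none, none)
  match r.1 with
  | some s => s
  | none =>
    match r.2.1 with
    | some s => s
    | none =>
      match r.2.2 with
      | some s => s
      | none => "Other"

-- ===== PRECONDITION & SPEC =====
def Spec_standardize_subject (subject : String) (all_subjects : List String) (out : String) : Prop := out = standardize_subject_alt subject all_subjects
instance (subject : String) (all_subjects : List String) (out : String) : Decidable (Spec_standardize_subject subject all_subjects out) := by unfold Spec_standardize_subject; infer_instance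

-- ===== CLAIM (what is proved, stated in full; the proofs are below) =====
def Claim_equal_standardize_subject : Prop := ∀ (subject : String) (all_subjects : List String), Dom_standardize_subject subject all_subjects → Spec_standardize_subject subject all_subjects (standardize_subject subject all_subjects)

-- ===== LEMMAS AND PROOFS =====

-- B's single fold fills each slot independently with the first match of its predicate.
lemma fold3 {p q u : String → Bool} : ∀ (l : List String) (e c s : Option String),
    l.foldl
      (fun (acc : Option String × Option String × Option String) x =>
        (if acc.1.isNone && p x then some x else acc.1,
         if acc.2.1.isNone && q x then some x else acc.2.1,
         if acc.2.2.isNone && u x then some x else acc.2.2)) (e, c, s)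
    = (e.orElse (fun _ => l.find? p), c.orElse (fun _ => l.find? q),
       s.orElse (fun _ => l.find? u)) := by
  intro l
  induction l with
  | nil => intro e c s; cases e <;> cases c <;> cases s <;> rfl
  | cons x t ih =>
    intro e c s
    have step : ∀ (o : Option String) (f : String → Bool),
        (if o.isNone && f x then some x else o).orElse (fun _ => t.find? f)
          = o.orElse (fun _ => (x :: t).find? f) := by
      intro o f
      cases o with
      | some a => rfl
      | none => cases hf : f x <;> simp [List.find?, hf, Option.orElse]
    simp only [List.foldl_cons, ih, step]

theorem standardize_subject_spec : Claim_equal_standardize_subject := by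
  intro subject all_subjects _
  unfold Spec_standardize_subject standardize_subject standardize_subject_alt
  simp only [fold3]
  set subj := PySem.Str.strip subject with hsubj
  have hq : (fun s => PySem.Str.lower subj == PySem.Str.lower s)
      = (fun s => PySem.Str.lower s == PySem.Str.lower subj) := by
    funext s; simp [eq_comm]
  rw [hq]
  simp only [Option.orElse]
  rcases hfp : all_subjects.find? (fun s => s == subj) with _ | x
  · have hnm : subj ∉ all_subjects := by
      rw [List.find?_eq_none] at hfp
      intro h
      exact absurd (by simp : (subj == subj) = true) (hfp subj h)
    simp [hnm]
  · have hx : x = subj := by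
      have := List.find?_some hfp
      simpa using this
    have hm : subj ∈ all_subjects := hx ▸ List.mem_of_find?_eq_some hfp
    simp [hm, hx]
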